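-- pv_equiv track=rewrite | github.com/yoojm4718/makit-ps | beginner_coder/3_several/card_game.py | color_result
-- ===== SOURCE A (Python) =====
-- def color_result(color):
--     result = {}
--
--     for i in range(5):
--         cnt = 1
--         if color[i] in result.keys(): continue
--
--         for j in range(i + 1, 5):
--             if color[j] == color[i]: cnt += 1
--
--         if cnt > 1: result[color[i]] = cnt
--
--     return result
-- ===== SOURCE B (Python) =====
-- def color_result(color):
--     counts = {}
--     for i in range(5):
--         c = color[i]
--         counts[c] = counts.get(c, 0) + 1
--     return {c: n for c, n in counts.items() if n > 1}
-- ===== Notes on version B (the rewrite author's own statement) =====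
-- stated objective: simpler
-- what changed: Replaces A's nested scan (for each first occurrence, rescan the remaining cards to count it) by a single counting pass over the five cards followed by a filter of the frequency table.
import Mathlib
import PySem

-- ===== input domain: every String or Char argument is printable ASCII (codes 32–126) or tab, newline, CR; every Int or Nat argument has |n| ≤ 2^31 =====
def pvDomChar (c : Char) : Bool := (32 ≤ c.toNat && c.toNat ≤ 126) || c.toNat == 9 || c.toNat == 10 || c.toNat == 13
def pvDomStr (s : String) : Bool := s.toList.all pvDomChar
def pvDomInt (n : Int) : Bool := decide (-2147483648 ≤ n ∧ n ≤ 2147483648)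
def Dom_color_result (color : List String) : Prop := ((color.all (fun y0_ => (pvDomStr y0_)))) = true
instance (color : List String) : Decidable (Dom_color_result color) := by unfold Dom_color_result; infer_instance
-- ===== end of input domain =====

-- B replaces A's per-first-occurrence rescan of the remaining cards by one counting pass plus a filter of the frequency table (simpler).

-- ===== PORT A =====
def color_result (color : List String) : List (String × Int) :=
  ((PySem.List.pyRange 0 5 1).foldl (fun (result : PySem.Dict String Int) i =>
    let ci := PySem.List.pyGetD color i ""
    if (result.get? ci).isSome then result
    else
      let cnt := (PySem.List.pyRange (i + 1) 5 1).foldl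
        (fun cnt j => if PySem.List.pyGetD color j "" == ci then cnt + 1 else cnt) (1 : Int)
      if cnt > 1 then result.insert ci cnt else result)
    PySem.Dict.empty).items

-- ===== PORT B =====
def color_result_alt (color : List String) : List (String × Int) :=
  let counts := (PySem.List.pyRange 0 5 1).foldl (fun (d : PySem.Dict String Int) i =>
    let c := PySem.List.pyGetD color i ""
    d.insert c (d.getD c 0 + 1)) PySem.Dict.empty
  (counts.items.foldl (fun (d : PySem.Dict String Int) p =>
    if p.2 > 1 then d.insert p.1 p.2 else d) PySem.Dict.empty).items

-- ===== PRECONDITION & SPEC =====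
-- On lists shorter than 5 the Python A raises IndexError; Pre_ admits exactly the inputs where it returns.
def Pre_color_result (color : List String) : Prop := 5 ≤ color.length
instance (color : List String) : Decidable (Pre_color_result color) := by unfold Pre_color_result; infer_instance
def pvWitness_color_result : List String := ["red", "blue", "red", "green", "blue"]
def Spec_color_result (color : List String) (out : List (String × Int)) : Prop := out = color_result_alt color
instance (color : List String) (out : List (String × Int)) : Decidable (Spec_color_result color out) := by unfold Spec_color_result; infer_instance

-- ===== CLAIM (what is proved, stated in full; the proofs are below) =====
def Claim_equal_color_result : Prop := ∀ (color : List String), Dom_color_result color → Pre_color_result color → Spec_color_result color (color_result color)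

-- ===== LEMMAS AND PROOFS =====

-- A's outer loop, abstracted over the suffix of cards still to process.
def aRec : List String → PySem.Dict String Int → PySem.Dict String Int
  | [], res => res
  | x :: xs, res =>
    aRec xs
      (if (res.get? x).isSome then res
       else
         let cnt := xs.foldl (fun cnt y => if y == x then cnt + 1 else cnt) (1 : Int)
         if cnt > 1 then res.insert x cnt else res)

-- The dictionary A has built after processing the cards of p, with t the full hand.
def dictOf (t p : List String) : PySem.Dict String Int :=
  PySem.Dict.mk (((PySem.Set.ofList p).filter (fun k => 1 < t.count k)).map
    (fun k => (k, (t.count k : Int))))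

theorem isSome_get? (d : PySem.Dict String Int) (x : String) :
    (d.get? x).isSome = d.contains x := by
  rcases hc : d.contains x
  · simpa using (PySem.Dict.get?_eq_none_iff_contains d x).2 hc
  · rcases h : d.get? x with _ | v
    · simpa [hc] using (PySem.Dict.get?_eq_none_iff_contains d x).1 h
    · rfl

theorem contains_dictOf (t p : List String) (x : String) :
    (dictOf t p).contains x = true ↔ x ∈ p ∧ 1 < t.count x := by
  simp [dictOf, PySem.Dict.contains_mk, List.any_eq_true, PySem.Set.mem_ofList]

theorem aRec_inv : ∀ (xs pre t : List String), t = pre ++ xs →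
    aRec xs (dictOf t pre) = dictOf t t := by
  intro xs
  induction xs with
  | nil => intro pre t h; simp [aRec, h]
  | cons x xs ih =>
    intro pre t h
    have hcnt : xs.foldl (fun cnt y => if y == x then cnt + 1 else cnt) (1 : Int)
        = 1 + (List.count x xs : Int) := by
      rw [PySem.List.foldl_count_if (p := fun y => y == x)]
      rfl
    have hassoc : t = (pre ++ [x]) ++ xs := by simpa [List.append_assoc] using h
    simp only [aRec, isSome_get?, hcnt]
    rcases hx : (dictOf t pre).contains x with _ | _
    · -- x not yet in the result dictionary
      have hnx : ¬ (x ∈ pre ∧ 1 < List.count x t) := by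
        intro hc
        have := (contains_dictOf t pre x).2 hc
        simp [hx] at this
      have hnotpre : x ∉ pre := by
        intro hxp
        refine hnx ⟨hxp, ?_⟩
        have h1 : 1 ≤ List.count x pre := List.count_pos_iff.2 hxp
        subst h
        simp [List.count_append]
        omega
      have hc0 : List.count x pre = 0 := List.count_eq_zero.2 hnotpre
      have hct : List.count x t = List.count x xs + 1 := by
        subst h
        simp [List.count_append, hc0]
      have hnotofl : x ∉ PySem.Set.ofList pre := fun hm => hnotpre ((PySem.Set.mem_ofList _ _).1 hm)
      simp only [Bool.false_eq_true, if_false]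
      by_cases hdup : 0 < List.count x xs
      · have hcond : (1 : Int) + (List.count x xs : Int) > 1 := by
          have : (1 : Int) ≤ (List.count x xs : Int) := by exact_mod_cast hdup
          omega
        rw [if_pos hcond]
        have heq : (dictOf t pre).insert x (1 + (List.count x xs : Int)) = dictOf t (pre ++ [x]) := by
          apply PySem.Dict.ext
          rw [PySem.Dict.items_insert_of_not_contains _ _ hx]
          simp only [dictOf, PySem.Set.ofList_append_singleton,
            PySem.Set.add_of_not_mem hnotofl, List.filter_append, List.map_append]
          have hq : (decide (1 < List.count x t)) = true := by
            simp
            omega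
          have hcast : (List.count x t : Int) = 1 + (List.count x xs : Int) := by
            rw [hct]; push_cast; ring
          simp [hq, hcast]
        rw [heq]
        exact ih (pre ++ [x]) t hassoc
      · have hz : List.count x xs = 0 := by omega
        have hcond : ¬ ((1 : Int) + (List.count x xs : Int) > 1) := by
          simp [hz]
        rw [if_neg hcond]
        have heq : dictOf t pre = dictOf t (pre ++ [x]) := by
          simp only [dictOf, PySem.Set.ofList_append_singleton,
            PySem.Set.add_of_not_mem hnotofl, List.filter_append, List.map_append]
          have hq : (decide (1 < List.count x t)) = false := by
            simp [hct, hz]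
          simp [hq]
        rw [heq]
        exact ih (pre ++ [x]) t hassoc
    · -- x already in the result dictionary: nothing changes
      obtain ⟨hmem, _⟩ := (contains_dictOf t pre x).1 hx
      have heq : dictOf t pre = dictOf t (pre ++ [x]) := by
        simp only [dictOf, PySem.Set.ofList_append_singleton,
          PySem.Set.add_of_mem ((PySem.Set.mem_ofList _ _).2 hmem)]
      simp only [if_true]
      rw [heq]
      exact ih (pre ++ [x]) t hassoc

theorem foldl_filter_insert : ∀ (l : List (String × Int)) (acc : PySem.Dict String Int),
    (∀ p ∈ l, acc.contains p.1 = false) → (l.map Prod.fst).Nodup →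
    l.foldl (fun d p => if p.2 > 1 then d.insert p.1 p.2 else d) acc
      = PySem.Dict.mk (acc.items ++ l.filter (fun p => p.2 > 1)) := by
  intro l
  induction l with
  | nil => intro acc _ _; exact (PySem.Dict.ext (by simp)).symm
  | cons p l ih =>
    intro acc hcon hnd
    have hconp : acc.contains p.1 = false := hcon p (List.mem_cons_self)
    simp only [List.foldl]
    by_cases hp : p.2 > 1
    · rw [if_pos hp]
      have hitems : (acc.insert p.1 p.2).items = acc.items ++ [p] :=
        PySem.Dict.items_insert_of_not_contains acc p.2 hconp
      have hmapnd : (p.1 :: l.map Prod.fst).Nodup := by simpa using hnd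
      have hp1 : p.1 ∉ l.map Prod.fst := (List.nodup_cons.1 hmapnd).1
      have hcon' : ∀ q ∈ l, (acc.insert p.1 p.2).contains q.1 = false := by
        intro q hq
        have hne : q.1 ≠ p.1 := fun hqe => hp1 (hqe ▸ List.mem_map_of_mem hq)
        rw [show (acc.insert p.1 p.2).contains q.1
            = ((acc.insert p.1 p.2).items.any fun r => r.1 == q.1) from
            PySem.Dict.contains_mk _ _, hitems]
        have hacc : (acc.items.any fun r => r.1 == q.1) = false := by
          have := hcon q (List.mem_cons_of_mem _ hq)
          rw [show acc.contains q.1 = (acc.items.any fun r => r.1 == q.1) from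
            PySem.Dict.contains_mk _ _] at this
          exact this
        simp [List.any_append, hacc, hne.symm]
      have hnd' : (l.map Prod.fst).Nodup := (List.nodup_cons.1 hmapnd).2
      rw [ih _ hcon' hnd', hitems]
      simp [hp, List.append_assoc]
    · rw [if_neg hp]
      rw [ih _ (fun q hq => hcon q (List.mem_cons_of_mem _ hq)) (List.nodup_cons.1 hnd).2]
      simp [hp]

theorem color_result_five (a b c d e : String) (rest : List String) :
    color_result (a :: b :: c :: d :: e :: rest) = color_result_alt (a :: b :: c :: d :: e :: rest) := by
  have h5 : PySem.List.pyRange 0 5 1 = [0,1,2,3,4] := by decide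
  have hr1 : PySem.List.pyRange ((0:Int) + 1) 5 1 = [1,2,3,4] := by decide
  have hr2 : PySem.List.pyRange ((1:Int) + 1) 5 1 = [2,3,4] := by decide
  have hr3 : PySem.List.pyRange ((2:Int) + 1) 5 1 = [3,4] := by decide
  have hr4 : PySem.List.pyRange ((3:Int) + 1) 5 1 = [4] := by decide
  have hr5 : PySem.List.pyRange ((4:Int) + 1) 5 1 = [] := by decide
  have g0 : PySem.List.pyGetD (a::b::c::d::e::rest) 0 "" = a := by
    simp [PySem.List.pyGetD_zero_cons]
  have g1 : PySem.List.pyGetD (a::b::c::d::e::rest) 1 "" = b := by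
    rw [PySem.List.pyGetD_ofNat']
    rfl
  have g2 : PySem.List.pyGetD (a::b::c::d::e::rest) 2 "" = c := by
    rw [PySem.List.pyGetD_ofNat']
    rfl
  have g3 : PySem.List.pyGetD (a::b::c::d::e::rest) 3 "" = d := by
    rw [PySem.List.pyGetD_ofNat']
    rfl
  have g4 : PySem.List.pyGetD (a::b::c::d::e::rest) 4 "" = e := by
    rw [PySem.List.pyGetD_ofNat']
    rfl
  have hA : color_result (a::b::c::d::e::rest)
      = (aRec [a,b,c,d,e] PySem.Dict.empty).items := by
    simp only [color_result, h5, List.foldl, g0, g1, g2, g3, g4, hr1, hr2, hr3, hr4, hr5, aRec]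
  have hB : color_result_alt (a::b::c::d::e::rest)
      = ((PySem.Dict.counter [a,b,c,d,e]).items.foldl
          (fun (d : PySem.Dict String Int) p =>
            if p.2 > 1 then d.insert p.1 p.2 else d) PySem.Dict.empty).items := by
    have hc := PySem.Dict.foldl_insert_getD_add_one_eq_counter (xs := [a,b,c,d,e])
    simp only [List.foldl] at hc
    simp only [color_result_alt, h5, List.foldl, g0, g1, g2, g3, g4, hc]
  have hempty : dictOf [a,b,c,d,e] [] = PySem.Dict.empty := by
    simp [dictOf]
    rfl
  have hAv : aRec [a,b,c,d,e] PySem.Dict.empty = dictOf [a,b,c,d,e] [a,b,c,d,e] := by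
    rw [← hempty]
    exact aRec_inv [a,b,c,d,e] [] [a,b,c,d,e] rfl
  have hitems := PySem.Dict.items_counter (xs := [a,b,c,d,e])
  have hndkeys : (((PySem.Dict.counter [a,b,c,d,e]).items).map Prod.fst).Nodup := by
    rw [hitems]
    simp only [List.map_map]
    have hid : (Prod.fst ∘ fun k => (k, (List.count k [a,b,c,d,e] : Int))) = id := rfl
    rw [hid, List.map_id]
    exact PySem.Set.nodup_ofList _
  have hBv := foldl_filter_insert ((PySem.Dict.counter [a,b,c,d,e]).items)
      PySem.Dict.empty (by simp [PySem.Dict.contains_empty]) hndkeys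
  rw [hA, hB, hAv, hBv, hitems]
  show _ = (PySem.Dict.mk ([] ++ _)).items
  simp only [List.nil_append]
  show ((((PySem.Set.ofList [a,b,c,d,e]).filter
      (fun k => 1 < List.count k [a,b,c,d,e])).map
      (fun k => (k, (List.count k [a,b,c,d,e] : Int)))) : List (String × Int)) = _
  rw [List.filter_map]
  apply congrArg
  apply List.filter_congr
  intro k _
  simp [Function.comp]

-- ===== VERDICT (by name: the statement is the Claim_ definition above) =====
theorem color_result_spec : Claim_equal_color_result := by
  intro color _ hpre
  unfold Spec_color_result
  match color, hpre with
  | a :: b :: c :: d :: e :: rest, _ => exact color_result_five a b c d e rest
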